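-- pv_equiv track=rewrite | github.com/shahzeb171/code-compass | scripts/chunker.py | _detect_code_blocks
-- ===== SOURCE A (Python) =====
-- from typing import List, Dict, Any, Optional, Tuple
--
-- def _detect_code_blocks(func_lines: List[str], func_name: str) -> List[Dict[str, str]]:
--     """Detect logical code blocks within a function"""
--     blocks = []
--     current_block = []
--     block_type = "sequential"
--
--     for line in func_lines:
--         stripped = line.strip()
--
--         if any(keyword in stripped for keyword in ['if ', 'elif ', 'else:']):
--             if current_block:
--                 blocks.append({
--                     'content': '\n'.join(current_block),
--                     'type': block_type,
--                     'purpose': f"Logic block in {func_name}"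
--                 })
--                 current_block = []
--             block_type = "conditional"
--         elif any(keyword in stripped for keyword in ['for ', 'while ']):
--             if current_block:
--                 blocks.append({
--                     'content': '\n'.join(current_block),
--                     'type': block_type,
--                     'purpose': f"Logic block in {func_name}"
--                 })
--                 current_block = []
--             block_type = "loop"
--         elif any(keyword in stripped for keyword in ['try:', 'except', 'finally:']):
--             if current_block:
--                 blocks.append({
--                     'content': '\n'.join(current_block),
--                     'type': block_type,
--                     'purpose': f"Logic block in {func_name}"
--                 })
--                 current_block = []
--             block_type = "exception_handling"
--
--         current_block.append(line)
--
--     if current_block: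
--         blocks.append({
--             'content': '\n'.join(current_block),
--             'type': block_type,
--             'purpose': f"Final block in {func_name}"
--         })
--
--     return blocks
-- ===== SOURCE B (Python) =====
-- def _detect_code_blocks(func_lines, func_name):
--     """Detect logical code blocks within a function (recursive segmentation)."""
--
--     def category(line):
--         s = line.strip()
--         if 'if ' in s or 'elif ' in s or 'else:' in s:
--             return 'conditional'
--         if 'for ' in s or 'while ' in s:
--             return 'loop'
--         if 'try:' in s or 'except' in s or 'finally:' in s:
--             return 'exception_handling'
--         return None
--
--     def segments(lines):
--         # a segment = one line plus the run of following non-keyword lines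
--         if not lines:
--             return []
--         i = 1
--         while i < len(lines) and category(lines[i]) is None:
--             i += 1
--         return [lines[:i]] + segments(lines[i:])
--
--     def block(seg, purpose):
--         return {'content': '\n'.join(seg),
--                 'type': category(seg[0]) or 'sequential',
--                 'purpose': purpose}
--
--     def emit(segs):
--         if not segs:
--             return []
--         if len(segs) == 1:
--             return [block(segs[0], f"Final block in {func_name}")]
--         return [block(segs[0], f"Logic block in {func_name}")] + emit(segs[1:])
--
--     return emit(segments(func_lines))
-- ===== Notes on version B (the rewrite author's own statement) =====
-- stated objective: alternative
-- what changed: Replaces A's single incremental flush loop (mutable current_block/block_type state) by a recursive segmentation: split the lines into keyword-delimited segments first, then label and join each segment independently; a timing run measured it ~3x faster (classification once per line head vs per-line triple any() scans and list rebuilding).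
import Mathlib
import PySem

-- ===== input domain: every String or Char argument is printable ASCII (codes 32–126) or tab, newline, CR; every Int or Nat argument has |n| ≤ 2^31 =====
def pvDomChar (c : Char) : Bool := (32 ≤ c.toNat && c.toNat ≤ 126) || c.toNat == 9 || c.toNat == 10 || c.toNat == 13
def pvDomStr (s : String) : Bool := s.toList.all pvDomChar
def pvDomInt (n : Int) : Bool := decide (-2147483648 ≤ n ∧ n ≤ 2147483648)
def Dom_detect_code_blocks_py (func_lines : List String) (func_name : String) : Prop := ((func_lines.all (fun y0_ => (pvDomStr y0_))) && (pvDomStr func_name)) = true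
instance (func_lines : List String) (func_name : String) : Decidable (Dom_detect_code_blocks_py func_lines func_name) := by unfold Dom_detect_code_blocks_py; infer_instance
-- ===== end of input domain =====

-- B replaces A's incremental flush loop by a recursive segmentation (split the lines
-- into keyword-delimited segments, then label each segment); objective: alternative.

-- ===== PORT A =====
-- flush step: "if current_block: blocks.append({...'Logic block...'}); current_block = []"
def pvAflush (func_name block_type : String) (blocks : List (List (String × String)))
    (current_block : List String) : List (List (String × String)) × List String :=
  if current_block.isEmpty then (blocks, current_block)
  else (blocks ++ [[("content", PySem.Str.join "\n" current_block), ("type", block_type),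
                    ("purpose", "Logic block in " ++ func_name)]], [])

def pvAgo (func_name : String) : List String → List (List (String × String)) →
    List String → String → List (List (String × String))
  | [], blocks, current_block, block_type =>
      if current_block.isEmpty then blocks
      else blocks ++ [[("content", PySem.Str.join "\n" current_block), ("type", block_type),
                       ("purpose", "Final block in " ++ func_name)]]
  | line :: rest, blocks, current_block, block_type =>
      let stripped := PySem.Str.strip line
      if ["if ", "elif ", "else:"].any (fun k => PySem.Str.isIn k stripped) then
        let p := pvAflush func_name block_type blocks current_block
        pvAgo func_name rest p.1 (p.2 ++ [line]) "conditional"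
      else if ["for ", "while "].any (fun k => PySem.Str.isIn k stripped) then
        let p := pvAflush func_name block_type blocks current_block
        pvAgo func_name rest p.1 (p.2 ++ [line]) "loop"
      else if ["try:", "except", "finally:"].any (fun k => PySem.Str.isIn k stripped) then
        let p := pvAflush func_name block_type blocks current_block
        pvAgo func_name rest p.1 (p.2 ++ [line]) "exception_handling"
      else
        pvAgo func_name rest blocks (current_block ++ [line]) block_type

def detect_code_blocks_py (func_lines : List String) (func_name : String) :
    List (List (String × String)) :=
  pvAgo func_name func_lines [] [] "sequential"

-- ===== PORT B =====
def pvCategory (line : String) : Option String :=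
  let s := PySem.Str.strip line
  if PySem.Str.isIn "if " s || (PySem.Str.isIn "elif " s || PySem.Str.isIn "else:" s) then
    some "conditional"
  else if PySem.Str.isIn "for " s || PySem.Str.isIn "while " s then some "loop"
  else if PySem.Str.isIn "try:" s || (PySem.Str.isIn "except" s || PySem.Str.isIn "finally:" s) then
    some "exception_handling"
  else none

-- segments(lines): first line plus the run of following non-keyword lines, then recurse
def pvSegments : List String → List (List String)
  | [] => []
  | l :: rest =>
      (l :: rest.takeWhile (fun s => (pvCategory s).isNone)) ::
        pvSegments (rest.dropWhile (fun s => (pvCategory s).isNone))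
termination_by lines => lines.length
decreasing_by
  simp only [List.length_cons]
  exact Nat.lt_succ_of_le (List.length_dropWhile_le _ _)

def pvBlock (seg : List String) (purpose : String) : List (String × String) :=
  [("content", PySem.Str.join "\n" seg),
   ("type", (pvCategory (seg.headD "")).getD "sequential"),
   ("purpose", purpose)]

def pvEmit (func_name : String) : List (List String) → List (List (String × String))
  | [] => []
  | [seg] => [pvBlock seg ("Final block in " ++ func_name)]
  | seg :: rest => pvBlock seg ("Logic block in " ++ func_name) :: pvEmit func_name rest

def detect_code_blocks_py_alt (func_lines : List String) (func_name : String) :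
    List (List (String × String)) :=
  pvEmit func_name (pvSegments func_lines)

-- ===== PRECONDITION & SPEC =====
def Spec_detect_code_blocks_py (func_lines : List String) (func_name : String) (out : List (List (String × String))) : Prop := out = detect_code_blocks_py_alt func_lines func_name
instance (func_lines : List String) (func_name : String) (out : List (List (String × String))) : Decidable (Spec_detect_code_blocks_py func_lines func_name out) := by unfold Spec_detect_code_blocks_py; infer_instance

-- ===== CLAIM (what is proved, stated in full; the proofs are below) =====
def Claim_equal_detect_code_blocks_py : Prop := ∀ (func_lines : List String) (func_name : String), Dom_detect_code_blocks_py func_lines func_name → Spec_detect_code_blocks_py func_lines func_name (detect_code_blocks_py func_lines func_name)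

-- ===== LEMMAS AND PROOFS =====

-- A's pending-block semantics, written as a function of the remaining lines
def pvPending (func_name : String) : List String → List String → String →
    List (List (String × String))
  | [], cur, bt =>
      [[("content", PySem.Str.join "\n" cur), ("type", bt),
        ("purpose", "Final block in " ++ func_name)]]
  | l :: rest, cur, bt =>
      match pvCategory l with
      | none => pvPending func_name rest (cur ++ [l]) bt
      | some c =>
          [("content", PySem.Str.join "\n" cur), ("type", bt),
           ("purpose", "Logic block in " ++ func_name)] :: pvPending func_name rest [l] c

-- A's step, rephrased through pvCategory
theorem pvAgo_cons (func_name line : String) (rest : List String)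
    (blocks : List (List (String × String))) (cur : List String) (bt : String) :
    pvAgo func_name (line :: rest) blocks cur bt =
      match pvCategory line with
      | none => pvAgo func_name rest blocks (cur ++ [line]) bt
      | some c =>
          let p := pvAflush func_name bt blocks cur
          pvAgo func_name rest p.1 (p.2 ++ [line]) c := by
  show (let stripped := PySem.Str.strip line; _) = _
  simp only [pvAgo, pvCategory, List.any_cons, List.any_nil, Bool.or_false]
  split_ifs <;> rfl

theorem pvAgo_eq_pending (func_name : String) (lines : List String) :
    ∀ (blocks : List (List (String × String))) (cur : List String) (bt : String),
      cur ≠ [] →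
      pvAgo func_name lines blocks cur bt = blocks ++ pvPending func_name lines cur bt := by
  induction lines with
  | nil =>
      intro blocks cur bt h
      simp [pvAgo, pvPending, List.isEmpty_iff, h]
  | cons l rest ih =>
      intro blocks cur bt h
      have he : cur.isEmpty = false := by simp [h]
      rw [pvAgo_cons]
      cases hc : pvCategory l with
      | none =>
          simp only [pvPending, hc]
          exact ih blocks (cur ++ [l]) bt (by simp)
      | some c =>
          simp only [pvPending, hc, pvAflush, he, Bool.false_eq_true, if_false, List.nil_append]
          rw [ih _ [l] c (by simp)]
          simp

theorem pending_eq_emit (func_name : String) (lines : List String) :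
    ∀ (c : String) (cs : List String),
      pvPending func_name lines (c :: cs) ((pvCategory c).getD "sequential") =
        pvEmit func_name
          ((c :: (cs ++ lines.takeWhile (fun s => (pvCategory s).isNone))) ::
            pvSegments (lines.dropWhile (fun s => (pvCategory s).isNone))) := by
  induction lines with
  | nil =>
      intro c cs
      rw [pvSegments.eq_def]
      simp [pvPending, pvEmit, pvBlock]
  | cons l rest ih =>
      intro c cs
      cases hc : pvCategory l with
      | none =>
          have hn : (pvCategory l).isNone = true := by simp [hc]
          simp only [pvPending, hc, List.takeWhile_cons, List.dropWhile_cons]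
          simpa using ih c (cs ++ [l])
      | some k =>
          have hn : (pvCategory l).isNone = false := by simp [hc]
          simp only [pvPending, hc, List.takeWhile_cons, List.dropWhile_cons]
          rw [pvSegments.eq_def]
          have hk : (pvCategory l).getD "sequential" = k := by simp [hc]
          rw [← hk, ih l []]
          simp [pvEmit, pvBlock]

-- ===== VERDICT (by name: the statement is the Claim_ definition above) =====
theorem detect_code_blocks_py_spec : Claim_equal_detect_code_blocks_py := by
  intro func_lines func_name _
  show detect_code_blocks_py func_lines func_name = detect_code_blocks_py_alt func_lines func_name
  cases func_lines with
  | nil =>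
      rw [detect_code_blocks_py, detect_code_blocks_py_alt, pvSegments.eq_def]
      rfl
  | cons l rest =>
      unfold detect_code_blocks_py detect_code_blocks_py_alt
      cases hc : pvCategory l with
      | none =>
          simp only [pvAgo_cons, hc, List.nil_append]
          rw [pvAgo_eq_pending func_name rest [] [l] "sequential" (by simp)]
          have h1 : ("sequential" : String) = (pvCategory l).getD "sequential" := by simp [hc]
          rw [h1, pending_eq_emit]
          conv_rhs => rw [pvSegments.eq_def]
          simp
      | some c =>
          simp only [pvAgo_cons, hc, pvAflush, List.isEmpty_nil, if_true, List.nil_append]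
          rw [pvAgo_eq_pending func_name rest [] [l] c (by simp)]
          have h1 : c = (pvCategory l).getD "sequential" := by simp [hc]
          rw [h1, pending_eq_emit]
          conv_rhs => rw [pvSegments.eq_def]
          simp
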